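-- pv_equiv track=rewrite | github.com/baominh98/Computer-Vision | templates/PhuongTrinhBat2.py | check
-- ===== SOURCE A (Python) =====
-- def check(a):
--     for i in range(0,len(a)):
--         if(a[i] != '-'):
--             if(ord(a[i]) <48 or ord(a[i])>57):
--                 return False
--     if(a ==''):
--         return False
--     return True
-- ===== SOURCE B (Python) =====
-- import re
--
-- def check(a):
--     return re.fullmatch(r'[0-9-]+', a) is not None
-- ===== Notes on version B (the rewrite author's own statement) =====
-- stated objective: idiomatic
-- what changed: Replaced the per-character loop with explicit early returns and a trailing emptiness test by a single regex fullmatch against [0-9-]+, whose + enforces nonemptiness.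
import Mathlib
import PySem

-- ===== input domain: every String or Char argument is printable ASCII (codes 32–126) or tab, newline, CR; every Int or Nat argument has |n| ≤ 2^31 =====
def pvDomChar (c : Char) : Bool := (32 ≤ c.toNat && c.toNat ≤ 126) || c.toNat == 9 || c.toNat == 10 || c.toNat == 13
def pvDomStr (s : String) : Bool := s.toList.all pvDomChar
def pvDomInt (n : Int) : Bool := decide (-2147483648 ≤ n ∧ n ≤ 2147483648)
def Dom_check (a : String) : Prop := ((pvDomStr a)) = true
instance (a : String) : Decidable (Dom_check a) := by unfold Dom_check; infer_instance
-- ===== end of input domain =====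

-- B replaces the per-character loop with a regex fullmatch on [0-9-]+ (idiomatic; + enforces nonemptiness).

-- ===== PORT A =====
-- the for-loop with its early 'return False': some false = early return, none = loop finished
def checkGo : List Char → Option Bool
  | [] => none
  | c :: rest =>
    if c ≠ '-' then
      if c.toNat < 48 ∨ c.toNat > 57 then some false else checkGo rest
    else checkGo rest

def check (a : String) : Bool :=
  match checkGo a.toList with
  | some b => b
  | none => if a == "" then false else true

-- ===== PORT B =====
-- fullmatch of [0-9-]+ : the string is nonempty and every character is an ASCII digit or '-'
def check_alt (a : String) : Bool :=
  !a.toList.isEmpty && a.toList.all (fun c => ('0' ≤ c && c ≤ '9') || c == '-')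

-- ===== PRECONDITION & SPEC =====
def Spec_check (a : String) (out : Bool) : Prop := out = check_alt a
instance (a : String) (out : Bool) : Decidable (Spec_check a out) := by unfold Spec_check; infer_instance

-- ===== CLAIM (what is proved, stated in full; the proofs are below) =====
def Claim_equal_check : Prop := ∀ (a : String), Dom_check a → Spec_check a (check a)

-- ===== LEMMAS AND PROOFS =====
theorem checkGo_eq (cs : List Char) :
    checkGo cs = if cs.all (fun c => ('0' ≤ c && c ≤ '9') || c == '-') then none else some false := by
  induction cs with
  | nil => simp [checkGo]
  | cons c rest ih =>
    simp only [checkGo, List.all_cons]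
    by_cases h : c = '-'
    · subst h; simp [ih]
    · by_cases hlo : c.toNat < 48
      · have h1 : ¬ ('0' ≤ c) := by show ¬ (48 ≤ c.toNat); omega
        simp [h, hlo, h1]
      · by_cases hhi : c.toNat > 57
        · have h2 : ¬ (c ≤ '9') := by show ¬ (c.toNat ≤ 57); omega
          simp [h, hlo, hhi, h2]
        · have h1 : ('0' ≤ c) := by show 48 ≤ c.toNat; omega
          have h2 : (c ≤ '9') := by show c.toNat ≤ 57; omega
          simp [h, hlo, hhi, ih, h1, h2]

theorem empty_iff (a : String) : (a == "") ↔ a.toList = [] := by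
  rw [beq_iff_eq]
  constructor
  · rintro rfl; rfl
  · intro h
    have := congrArg String.ofList h
    simpa using this

-- ===== VERDICT (by name: the statement is the Claim_ definition above) =====
theorem check_spec : Claim_equal_check := by
  intro a _
  unfold Spec_check check check_alt
  rw [checkGo_eq]
  by_cases h : a.toList.all (fun c => ('0' ≤ c && c ≤ '9') || c == '-')
  · simp only [h, if_pos]
    cases hl : a.toList with
    | nil => simp [(empty_iff a).mpr hl]
    | cons x xs =>
      have : ¬ (a == "") = true := by
        intro hb; rw [(empty_iff a).mp hb] at hl; cases hl
      simp [this]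
  · simp [h]
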